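-- pv_equiv track=rewrite | github.com/JuliusKnops/Chippies | code/algorithms/GeneticAlgorithm.py | count_crossings
-- ===== SOURCE A (Python) =====
-- def count_crossings(child: list) -> int:
--     """
--     Count the number of crossings being made in given solution
--     """
--     crossing = []
--     for path in child:
--         if path is None:
--             continue
--         path = path[1:len(path) - 1]
--         for node in path:
--             crossing.append(node)
--
--     return len(crossing) - len(set(crossing))
-- ===== SOURCE B (Python) =====
-- def count_crossings(child: list) -> int:
--     """
--     Count the number of crossings being made in given solution
--     """
--     seen = set()
--     dups = 0
--     for path in child:
--         if path is None:
--             continue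
--         for node in path[1:-1]:
--             if node in seen:
--                 dups += 1
--             else:
--                 seen.add(node)
--     return dups
-- ===== Notes on version B (the rewrite author's own statement) =====
-- stated objective: alternative
-- what changed: Replaces A's flat occurrence list plus a trailing set() and len-minus-len with a single streaming pass that maintains a seen-set and increments a duplicate counter per node, never materialising the occurrence list.
import Mathlib
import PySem

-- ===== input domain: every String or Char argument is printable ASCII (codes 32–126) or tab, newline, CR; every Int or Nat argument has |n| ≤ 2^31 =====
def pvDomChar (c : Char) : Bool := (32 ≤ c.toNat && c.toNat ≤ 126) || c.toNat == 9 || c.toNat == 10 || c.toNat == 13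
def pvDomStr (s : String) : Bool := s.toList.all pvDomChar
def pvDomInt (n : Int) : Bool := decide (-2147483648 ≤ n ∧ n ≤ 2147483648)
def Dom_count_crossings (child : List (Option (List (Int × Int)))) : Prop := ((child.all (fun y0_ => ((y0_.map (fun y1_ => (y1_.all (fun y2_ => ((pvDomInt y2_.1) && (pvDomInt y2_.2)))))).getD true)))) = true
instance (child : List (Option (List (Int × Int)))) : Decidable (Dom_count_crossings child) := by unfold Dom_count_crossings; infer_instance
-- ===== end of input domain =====

-- B replaces A's flat occurrence list + trailing set()/len-minus-len with a single
-- streaming pass maintaining a seen-set and a duplicate counter (objective: alternative).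

-- ===== PORT A =====
-- crossing = []; for path in child: skip None; path = path[1:len(path)-1]; append each node
def count_crossings (child : List (Option (List (Int × Int)))) : Int :=
  let crossing : List (Int × Int) :=
    child.foldl (fun acc p =>
      match p with
      | none => acc
      | some path =>
          (PySem.List.slice path (some 1) (some ((path.length : Int) - 1))).foldl
            (fun acc node => acc ++ [node]) acc) []
  (crossing.length : Int) - ((PySem.Set.ofList crossing).length : Int)

-- ===== PORT B =====
-- seen = set(); dups = 0; one pass over the interior nodes, counting repeats
def count_crossings_alt (child : List (Option (List (Int × Int)))) : Int :=
  let st :=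
    child.foldl (fun (st : PySem.Set (Int × Int) × Int) p =>
      match p with
      | none => st
      | some path =>
          (PySem.List.slice path (some 1) (some (-1))).foldl
            (fun (st : PySem.Set (Int × Int) × Int) node =>
              if st.1.contains node then (st.1, st.2 + 1) else (st.1.add node, st.2))
            st) (PySem.Set.empty, 0)
  st.2

-- ===== PRECONDITION & SPEC =====
def Spec_count_crossings (child : List (Option (List (Int × Int)))) (out : Int) : Prop := out = count_crossings_alt child
instance (child : List (Option (List (Int × Int)))) (out : Int) : Decidable (Spec_count_crossings child out) := by unfold Spec_count_crossings; infer_instance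

-- ===== CLAIM (what is proved, stated in full; the proofs are below) =====
def Claim_equal_count_crossings : Prop := ∀ (child : List (Option (List (Int × Int)))), Dom_count_crossings child → Spec_count_crossings child (count_crossings child)

-- ===== LEMMAS AND PROOFS =====

-- A's per-path slice [1:len-1] and B's [1:-1] extract the same interior segment.
theorem pvSlice_eq (p : List (Int × Int)) :
    PySem.List.slice p (some 1) (some ((p.length : Int) - 1)) =
    PySem.List.slice p (some 1) (some (-1)) := by
  simp only [PySem.List.slice, PySem.List.clampIdx]
  congr 1
  split_ifs <;> omega

def pvStep (st : PySem.Set (Int × Int) × Int) (node : Int × Int) : PySem.Set (Int × Int) × Int :=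
  if st.1.contains node then (st.1, st.2 + 1) else (st.1.add node, st.2)

-- The streaming step over one list: seen grows to Set.update, dups counts total minus new distinct.
theorem pvStep_foldl (L : List (Int × Int)) :
    ∀ (s : PySem.Set (Int × Int)) (d : Int),
      L.foldl pvStep (s, d) =
        (PySem.Set.update s L,
         d + (L.length : Int) - (((PySem.Set.update s L).length : Int) - (s.length : Int))) := by
  induction L with
  | nil => intro s d; simp [PySem.Set.update]
  | cons x L ih =>
      intro s d
      by_cases h : s.contains x = true
      · have hadd : PySem.Set.add s x = s := by simp only [PySem.Set.add, h, if_true]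
        simp only [List.foldl_cons, pvStep, h, if_true, PySem.Set.update, hadd]
        rw [show (L.foldl PySem.Set.add s) = PySem.Set.update s L from rfl,
          ih s (d + 1)]
        refine Prod.ext rfl ?_
        simp only [List.length_cons]
        push_cast; ring
      · have hadd : PySem.Set.add s x = s ++ [x] := by
          simp only [PySem.Set.add, h, if_false, Bool.false_eq_true]
        simp only [List.foldl_cons, pvStep, h, if_false, Bool.false_eq_true, PySem.Set.update, hadd]
        rw [show (L.foldl PySem.Set.add (s ++ [x])) = PySem.Set.update (s ++ [x]) L from rfl,
          ih (s ++ [x]) d]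
        refine Prod.ext rfl ?_
        simp only [List.length_append, List.length_cons, List.length_nil]
        push_cast; ring

theorem pvFlatten_singleton (l : List (Int × Int)) :
    (List.map (fun x => [x]) l).flatten = l := by
  induction l with
  | nil => rfl
  | cons a t ih => simp [ih]

-- A's flattened interior-node list.
def pvFlat (child : List (Option (List (Int × Int)))) : List (Int × Int) :=
  child.flatMap (fun p =>
    match p with
    | none => []
    | some path => PySem.List.slice path (some 1) (some (-1)))

theorem pvA_crossing (child : List (Option (List (Int × Int)))) :
    ∀ acc : List (Int × Int),
      child.foldl (fun acc p =>
        match p with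
        | none => acc
        | some path =>
            (PySem.List.slice path (some 1) (some ((path.length : Int) - 1))).foldl
              (fun acc node => acc ++ [node]) acc) acc = acc ++ pvFlat child := by
  induction child with
  | nil => intro acc; simp [pvFlat]
  | cons p child ih =>
      intro acc
      cases p with
      | none => simpa [pvFlat] using ih acc
      | some path =>
          rw [List.foldl_cons, ih]
          simp [pvSlice_eq, pvFlat, List.flatMap_cons, List.append_assoc, pvFlatten_singleton]

theorem pvB_foldl (child : List (Option (List (Int × Int)))) :
    ∀ st : PySem.Set (Int × Int) × Int,
      child.foldl (fun (st : PySem.Set (Int × Int) × Int) p =>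
        match p with
        | none => st
        | some path =>
            (PySem.List.slice path (some 1) (some (-1))).foldl
              (fun (st : PySem.Set (Int × Int) × Int) node =>
                if st.1.contains node then (st.1, st.2 + 1) else (st.1.add node, st.2))
              st) st = (pvFlat child).foldl pvStep st := by
  induction child with
  | nil => intro st; simp [pvFlat]
  | cons p child ih =>
      intro st
      cases p with
      | none => simpa [pvFlat] using ih st
      | some path =>
          simp only [List.foldl_cons, pvFlat, List.flatMap_cons, List.foldl_append]
          rw [ih]
          rfl

-- ===== VERDICT (by name: the statement is the Claim_ definition above) =====
theorem count_crossings_spec : Claim_equal_count_crossings := by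
  intro child _
  unfold Spec_count_crossings count_crossings count_crossings_alt
  rw [pvA_crossing child [], pvB_foldl child (PySem.Set.empty, 0), pvStep_foldl (pvFlat child) PySem.Set.empty 0]
  simp only [List.nil_append, PySem.Set.empty, PySem.Set.ofList, PySem.Set.update,
    List.length_nil, Nat.cast_zero]
  ring
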